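-- pv_equiv track=rewrite | github.com/Cabaglaban/aoc | aoc/y2023/d20/solve.py | sort_modules
-- ===== SOURCE A (Python) =====
-- class Module:
--     BROADCASTER = "b"
--     FLIP_FLOP = "%"
--     CONJUNCTION = "&"
--     RX = "rx"
--
-- def sort_modules(modules):
--     modules[Module.RX] = [Module.CONJUNCTION, []]
--
--     flip_flops = {}
--     conjunctions = {}
--
--     for name, m in modules.items():
--         t, o = m
--         if t == Module.FLIP_FLOP:
--             flip_flops[name] = 0
--         for oname in o:
--             if modules[oname][0] == Module.CONJUNCTION:
--                 conjunctions.setdefault(oname, {})[name] = -1 if oname == Module.RX else 0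
--
--     return flip_flops, conjunctions
-- ===== SOURCE B (Python) =====
-- class Module:
--     BROADCASTER = "b"
--     FLIP_FLOP = "%"
--     CONJUNCTION = "&"
--     RX = "rx"
--
-- def sort_modules(modules):
--     modules[Module.RX] = [Module.CONJUNCTION, []]
--
--     flip_flops = {name: 0 for name, (t, _) in modules.items() if t == Module.FLIP_FLOP}
--
--     # targets in first-reference order, then pull each target's inputs from all modules
--     targets = dict.fromkeys(
--         d for _, (_, outs) in modules.items() for d in outs
--         if modules[d][0] == Module.CONJUNCTION
--     )
--     conjunctions = {
--         d: {src: -1 if d == Module.RX else 0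
--             for src, (_, outs) in modules.items() if d in outs}
--         for d in targets
--     }
--     return flip_flops, conjunctions
-- ===== Notes on version B (the rewrite author's own statement) =====
-- stated objective: alternative
-- what changed: B inverts the loop nesting: instead of A's single push-style pass that scatters each module's outputs into setdefault-created inner dicts, B builds the flip-flop dict by one filter/map comprehension, collects the conjunction targets once (dict.fromkeys over all referenced outputs, first-reference order), and then pulls each target's inputs by scanning the module list per target.
import Mathlib
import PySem

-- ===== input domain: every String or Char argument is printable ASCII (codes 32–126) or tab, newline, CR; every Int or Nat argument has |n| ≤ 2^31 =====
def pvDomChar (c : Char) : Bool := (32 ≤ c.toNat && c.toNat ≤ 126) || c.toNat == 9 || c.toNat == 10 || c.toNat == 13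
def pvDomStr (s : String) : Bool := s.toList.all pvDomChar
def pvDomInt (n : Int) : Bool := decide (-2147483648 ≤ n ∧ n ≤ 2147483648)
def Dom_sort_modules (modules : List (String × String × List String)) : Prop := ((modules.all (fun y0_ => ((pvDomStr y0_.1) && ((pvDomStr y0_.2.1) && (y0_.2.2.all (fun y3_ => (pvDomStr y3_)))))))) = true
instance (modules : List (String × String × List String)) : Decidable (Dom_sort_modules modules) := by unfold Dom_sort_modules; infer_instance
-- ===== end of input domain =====

-- B inverts the nesting: flip-flops by one filter/map pass, conjunction targets collected once
-- in first-reference order, then each target PULLS its inputs by scanning all modules (objective: alternative).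
-- Note: the Python A mutates its argument (modules["rx"] = ...); B performs the same mutation; the
-- equivalence proved here is about the RETURN value.


-- ===== PORT A =====
def sort_modules (modules : List (String × String × List String)) :
    (List (String × Int)) × (List (String × List (String × Int))) :=
  -- modules[Module.RX] = [Module.CONJUNCTION, []]
  let m := (PySem.Dict.ofList modules).insert "rx" ("&", ([] : List String))
  -- for name, m in modules.items(): …  (flip_flops and conjunctions built in one pass)
  let st := m.items.foldl
    (fun (st : PySem.Dict String Int × PySem.Dict String (PySem.Dict String Int)) p =>
      let ff := if p.2.1 == "%" then st.1.insert p.1 0 else st.1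
      let conj := p.2.2.foldl
        (fun c oname =>
          if (m.getD oname ("", [])).1 == "&" then
            -- conjunctions.setdefault(oname, {})[name] = -1 if oname == Module.RX else 0
            (c.setdefault oname PySem.Dict.empty).modify oname PySem.Dict.empty
              (fun inner => inner.insert p.1 (if oname == "rx" then -1 else 0))
          else c)
        st.2
      (ff, conj))
    (PySem.Dict.empty, PySem.Dict.empty)
  (st.1.items, st.2.items.map (fun q => (q.1, q.2.items)))

-- ===== PORT B =====
def sort_modules_alt (modules : List (String × String × List String)) :
    (List (String × Int)) × (List (String × List (String × Int))) :=
  let m := (PySem.Dict.ofList modules).insert "rx" ("&", ([] : List String))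
  let items := m.items
  -- flip_flops = {name: 0 for name, (t, _) in modules.items() if t == "%"}
  let flip_flops := (items.filter (fun p => p.2.1 == "%")).map (fun p => (p.1, (0 : Int)))
  -- targets = dict.fromkeys(d for _,(_,outs) in modules.items() for d in outs if modules[d][0] == "&")
  let targets := PySem.List.dedup
    ((items.flatMap (fun p => p.2.2)).filter (fun d => (m.getD d ("", [])).1 == "&"))
  -- conjunctions = {d: {src: -1 if d == "rx" else 0 for src,(_,outs) in modules.items() if d in outs} for d in targets}
  let conjunctions := targets.map (fun d =>
    (d, (items.filter (fun p => p.2.2.contains d)).map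
          (fun p => (p.1, if d == "rx" then (-1 : Int) else 0))))
  (flip_flops, conjunctions)

-- ===== PRECONDITION & SPEC =====
-- Pre_ excludes exactly the inputs on which the Python A raises KeyError: some module's output
-- list names a module that is not a key of the dict (after the forced "rx" insertion).
def Pre_sort_modules (modules : List (String × String × List String)) : Prop :=
  ∀ p ∈ ((PySem.Dict.ofList modules).insert "rx" ("&", ([] : List String))).items,
    ∀ oname ∈ p.2.2,
      ((PySem.Dict.ofList modules).insert "rx" ("&", ([] : List String))).contains oname = true
instance (modules : List (String × String × List String)) : Decidable (Pre_sort_modules modules) := by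
  unfold Pre_sort_modules; infer_instance

def pvWitness_sort_modules : (List (String × String × List String)) :=
  [("a", "%", ["c"]), ("c", "&", ["rx"])]

def Spec_sort_modules (modules : List (String × String × List String)) (out : (List (String × Int)) × (List (String × List (String × Int)))) : Prop := out = sort_modules_alt modules
instance (modules : List (String × String × List String)) (out : (List (String × Int)) × (List (String × List (String × Int)))) : Decidable (Spec_sort_modules modules out) := by unfold Spec_sort_modules; infer_instance

-- ===== CLAIM (what is proved, stated in full; the proofs are below) =====
def Claim_equal_sort_modules : Prop := ∀ (modules : List (String × String × List String)), Dom_sort_modules modules → Pre_sort_modules modules → Spec_sort_modules modules (sort_modules modules)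

-- ===== LEMMAS AND PROOFS =====

def pvTgts (cond : String → Bool) (l : List (String × String × List String)) : List String :=
  PySem.List.dedup ((l.flatMap (fun p => p.2.2)).filter cond)

lemma mem_pvTgts (cond : String → Bool) (l : List (String × String × List String)) (d : String) :
    d ∈ pvTgts cond l ↔ (cond d = true ∧ ∃ p ∈ l, d ∈ p.2.2) := by
  simp [pvTgts, List.mem_filter, List.mem_flatMap]
  tauto

lemma pvTgts_append (cond : String → Bool) (l : List (String × String × List String))
    (n t : String) (u : List String) (d : String) :
    pvTgts cond (l ++ [(n, t, u ++ [d])])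
      = if cond d = true ∧ d ∉ pvTgts cond (l ++ [(n, t, u)]) then pvTgts cond (l ++ [(n, t, u)]) ++ [d]
        else pvTgts cond (l ++ [(n, t, u)]) := by
  have h1 : (l ++ [(n, t, u ++ [d])]).flatMap (fun p => p.2.2)
      = (l ++ [(n, t, u)]).flatMap (fun p => p.2.2) ++ [d] := by
    simp [List.flatMap_append]
  unfold pvTgts
  rw [h1]
  by_cases hc : cond d = true
  · rw [List.filter_append, List.filter_singleton]
    simp only [hc, cond_true]
    have h2 : PySem.List.dedup (((l ++ [(n, t, u)]).flatMap (fun p => p.2.2)).filter cond ++ [d])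
        = PySem.Set.add (PySem.List.dedup (((l ++ [(n, t, u)]).flatMap (fun p => p.2.2)).filter cond)) d := by
      simp [PySem.List.dedup, PySem.Set.ofList, List.foldl_append]
    rw [h2]
    by_cases hm : d ∈ pvTgts cond (l ++ [(n, t, u)])
    · have hcc : List.contains (PySem.List.dedup (((l ++ [(n,t,u)]).flatMap (fun p => p.2.2)).filter cond)) d = true := by
        simpa [pvTgts, List.contains_iff_mem] using hm
      have h3 : PySem.Set.add (PySem.List.dedup (((l ++ [(n,t,u)]).flatMap (fun p => p.2.2)).filter cond)) d
          = PySem.List.dedup (((l ++ [(n,t,u)]).flatMap (fun p => p.2.2)).filter cond) := by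
        simp only [PySem.Set.add, PySem.Set.contains, hcc]
        rw [if_pos trivial]
      rw [h3, if_neg (fun h => h.2 hm)]
    · have hcc : List.contains (PySem.List.dedup (((l ++ [(n,t,u)]).flatMap (fun p => p.2.2)).filter cond)) d = false := by
        simp [pvTgts] at hm
        simp
        simpa using hm
      have h3 : PySem.Set.add (PySem.List.dedup (((l ++ [(n,t,u)]).flatMap (fun p => p.2.2)).filter cond)) d
          = PySem.List.dedup (((l ++ [(n,t,u)]).flatMap (fun p => p.2.2)).filter cond) ++ [d] := by
        simp only [PySem.Set.add, PySem.Set.contains, hcc]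
        rw [if_neg (by simp)]
      rw [h3, if_pos ⟨trivial, hm⟩]
  · simp only [eq_false_of_ne_true hc]
    rw [List.filter_append, List.filter_singleton]
    simp [hc]

def pvInn (v : String → Int) (l : List (String × String × List String)) (d : String) :
    List (String × Int) :=
  (l.filter (fun p => p.2.2.contains d)).map (fun p => (p.1, v d))

def pvWit (cond : String → Bool) (v : String → Int) (l : List (String × String × List String)) :
    PySem.Dict String (PySem.Dict String Int) :=
  ⟨(pvTgts cond l).map (fun d => (d, ⟨pvInn v l d⟩))⟩

def pvStep (cond : String → Bool) (v : String → Int)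
    (c : PySem.Dict String (PySem.Dict String Int)) (src d : String) :
    PySem.Dict String (PySem.Dict String Int) :=
  if cond d then
    (c.setdefault d PySem.Dict.empty).modify d PySem.Dict.empty
      (fun inner => inner.insert src (v d))
  else c

lemma pvInn_last (v : String → Int) (pre : List (String × String × List String))
    (n t : String) (w : List String) (d : String) :
    pvInn v (pre ++ [(n, t, w)]) d
      = pvInn v pre d ++ (if w.contains d then [(n, v d)] else []) := by
  unfold pvInn
  rw [List.filter_append, List.map_append, List.filter_singleton]
  by_cases h : d ∈ w
  · simp [h]
  · simp [h]

lemma contains_last {w : List String} {d d' : String} (hne : d' ≠ d) :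
    (w ++ [d]).contains d' = w.contains d' := by
  simp [hne]

lemma find_beq_self {T : List String} {d : String} (h : d ∈ T) :
    T.find? (fun x => x == d) = some d := by
  induction T with
  | nil => cases h
  | cons x xs ih =>
    by_cases hx : x = d
    · subst hx; simp
    · simp only [List.find?_cons]
      rw [show (x == d) = false by simp [hx]]
      rcases List.mem_cons.mp h with h1 | h1
      · exact absurd h1.symm hx
      · exact ih h1

lemma contains_wit (cond : String → Bool) (v : String → Int)
    (l : List (String × String × List String)) (x : String) :
    (pvWit cond v l).contains x = decide (x ∈ pvTgts cond l) := by
  simp [pvWit, PySem.Dict.contains, List.any_map]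
  have : ((fun (p : String × PySem.Dict String Int) => p.1 == x) ∘ fun d => (d, (⟨pvInn v l d⟩ : PySem.Dict String Int))) = fun d => d == x := rfl
  rw [this]
  by_cases h : x ∈ pvTgts cond l
  · simp only [h, decide_true, List.any_eq_true]
    exact ⟨x, h, by simp⟩
  · simp only [h, decide_false, List.any_eq_false]
    intro a ha hax
    exact absurd ((eq_of_beq hax) ▸ ha) h

lemma getD_wit (cond : String → Bool) (v : String → Int)
    (l : List (String × String × List String)) (d : String) (dflt : PySem.Dict String Int)
    (h : d ∈ pvTgts cond l) :
    (pvWit cond v l).getD d dflt = ⟨pvInn v l d⟩ := by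
  unfold pvWit PySem.Dict.getD PySem.Dict.get?
  rw [List.find?_map]
  have : ((pvTgts cond l).find? ((fun p => p.1 == d) ∘ (fun d => (d, (⟨pvInn v l d⟩ : PySem.Dict String Int))))) = (pvTgts cond l).find? (fun x => x == d) := by
    rfl
  rw [this, find_beq_self h]
  rfl

lemma pvWit_append_nil (cond : String → Bool) (v : String → Int)
    (l : List (String × String × List String)) (n t : String) :
    pvWit cond v (l ++ [(n, t, ([] : List String))]) = pvWit cond v l := by
  unfold pvWit
  have ht : pvTgts cond (l ++ [(n, t, ([] : List String))]) = pvTgts cond l := by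
    unfold pvTgts; simp
  rw [ht]
  congr 1
  apply List.map_congr_left
  intro d _
  have h := pvInn_last v l n t [] d
  simp at h
  rw [h]

lemma insert_wit_mem (cond : String → Bool) (v : String → Int)
    (L : List (String × String × List String)) (d : String) (x : PySem.Dict String Int)
    (hm : d ∈ pvTgts cond L) :
    (pvWit cond v L).insert d x
      = ⟨(pvTgts cond L).map (fun d' => if d' = d then (d, x) else (d', ⟨pvInn v L d'⟩))⟩ := by
  have hcont : (pvWit cond v L).contains d = true := by rw [contains_wit]; simp [hm]
  unfold PySem.Dict.insert
  rw [if_pos hcont]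
  unfold pvWit
  congr 1
  rw [List.map_map]
  apply List.map_congr_left
  intro d' _
  by_cases h : d' = d
  · subst h; simp
  · simp [h]

lemma inner_insert_self (v : String → Int) (L : List (String × String × List String))
    (d n : String) (hex : ∃ p ∈ L, p.1 = n ∧ p.2.2.contains d = true) :
    (⟨pvInn v L d⟩ : PySem.Dict String Int).insert n (v d) = ⟨pvInn v L d⟩ := by
  obtain ⟨p, hp, hp1, hp2⟩ := hex
  have hcont : (⟨pvInn v L d⟩ : PySem.Dict String Int).contains n = true := by
    simp only [PySem.Dict.contains, List.any_eq_true]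
    refine ⟨(p.1, v d), ?_, by simp [hp1]⟩
    unfold pvInn
    exact List.mem_map_of_mem (List.mem_filter.mpr ⟨hp, hp2⟩)
  unfold PySem.Dict.insert
  rw [if_pos hcont]
  congr 1
  show List.map _ (pvInn v L d) = pvInn v L d
  conv_rhs => rw [← List.map_id (pvInn v L d)]
  apply List.map_congr_left
  intro q hq
  unfold pvInn at hq
  obtain ⟨r, _, rfl⟩ := List.mem_map.mp hq
  by_cases h : r.1 = n
  · simp [h]
  · simp [show (r.1 == n) = false by simp [h]]

lemma inn_contains_false (v : String → Int) (pre : List (String × String × List String))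
    (d n : String) (hn : n ∉ pre.map Prod.fst) :
    (⟨pvInn v pre d⟩ : PySem.Dict String Int).contains n = false := by
  simp only [PySem.Dict.contains, List.any_eq_false]
  intro q hq
  unfold pvInn at hq
  obtain ⟨r, hr, rfl⟩ := List.mem_map.mp hq
  have hmem : r.1 ∈ pre.map Prod.fst := List.mem_map_of_mem (List.mem_filter.mp hr).1
  intro he
  exact hn ((eq_of_beq he) ▸ hmem)


lemma pvInn_nil_of_not_mem (cond : String → Bool) (v : String → Int)
    (pre rest : List (String × String × List String)) (d : String)
    (hc : cond d = true) (hm : d ∉ pvTgts cond (pre ++ rest)) :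
    pvInn v pre d = [] := by
  unfold pvInn
  rw [List.map_eq_nil_iff, List.filter_eq_nil_iff]
  intro p hp
  simp only [Bool.not_eq_true]
  by_contra h
  simp only [Bool.not_eq_false] at h
  exact hm ((mem_pvTgts cond _ d).mpr ⟨hc, p, List.mem_append_left _ hp,
    by simpa [List.contains_iff_mem] using h⟩)

lemma pvStep_wit (cond : String → Bool) (v : String → Int)
    (pre : List (String × String × List String)) (n t : String) (u : List String) (d : String)
    (hn : n ∉ pre.map Prod.fst) :
    pvStep cond v (pvWit cond v (pre ++ [(n, t, u)])) n d
      = pvWit cond v (pre ++ [(n, t, u ++ [d])]) := by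
  unfold pvStep
  by_cases hc : cond d = true
  · rw [if_pos hc]
    by_cases hm : d ∈ pvTgts cond (pre ++ [(n, t, u)])
    · -- d already a conjunction key
      have hcont : (pvWit cond v (pre ++ [(n, t, u)])).contains d = true := by
        rw [contains_wit]; simp [hm]
      rw [PySem.Dict.setdefault_of_contains _ _ hcont]
      unfold PySem.Dict.modify
      rw [getD_wit _ _ _ _ _ hm]
      beta_reduce
      have ht : pvTgts cond (pre ++ [(n, t, u ++ [d])]) = pvTgts cond (pre ++ [(n, t, u)]) := by
        rw [pvTgts_append, if_neg (fun h => h.2 hm)]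
      by_cases hud : d ∈ u
      · -- this source was already recorded for d: everything is unchanged
        have hins : (⟨pvInn v (pre ++ [(n, t, u)]) d⟩ : PySem.Dict String Int).insert n (v d)
            = ⟨pvInn v (pre ++ [(n, t, u)]) d⟩ :=
          inner_insert_self v _ d n ⟨(n, t, u), List.mem_append_right _ (by simp), rfl,
            by simp [hud]⟩
        rw [hins, insert_wit_mem cond v _ d _ hm]
        unfold pvWit
        rw [ht]
        congr 1
        apply List.map_congr_left
        intro d' hd'
        by_cases h : d' = d
        · subst h
          rw [pvInn_last, pvInn_last]
          have : (u ++ [d']).contains d' = u.contains d' := by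
            simp [hud]
          rw [this]
          simp
        · simp only [if_neg h]
          congr 2
          rw [pvInn_last, pvInn_last, contains_last h]
      · -- existing key d, new source n appended to its input dict
        have hud' : u.contains d = false := by simp [hud]
        have hinnL : pvInn v (pre ++ [(n, t, u)]) d = pvInn v pre d := by
          rw [pvInn_last, hud']; simp
        have hnc : (⟨pvInn v (pre ++ [(n, t, u)]) d⟩ : PySem.Dict String Int).contains n = false := by
          rw [hinnL]; exact inn_contains_false v pre d n hn
        have hins : (⟨pvInn v (pre ++ [(n, t, u)]) d⟩ : PySem.Dict String Int).insert n (v d)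
            = ⟨pvInn v (pre ++ [(n, t, u ++ [d])]) d⟩ := by
          unfold PySem.Dict.insert
          rw [if_neg (by simp [hnc])]
          rw [hinnL, pvInn_last]
          have : (u ++ [d]).contains d = true := by simp
          rw [this]
          simp
        rw [hins, insert_wit_mem cond v _ d _ hm]
        unfold pvWit
        rw [ht]
        congr 1
        apply List.map_congr_left
        intro d' hd'
        by_cases h : d' = d
        · subst h; simp
        · simp only [if_neg h]
          congr 2
          rw [pvInn_last, pvInn_last, contains_last h]
    · -- new conjunction key d, appended at the end
      have hcont : (pvWit cond v (pre ++ [(n, t, u)])).contains d = false := by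
        rw [contains_wit]; simp [hm]
      have hsd : (pvWit cond v (pre ++ [(n, t, u)])).setdefault d PySem.Dict.empty
          = ⟨(pvWit cond v (pre ++ [(n, t, u)])).items ++ [(d, PySem.Dict.empty)]⟩ := by
        unfold PySem.Dict.setdefault
        rw [if_neg (by simp [hcont])]
      rw [hsd]
      unfold PySem.Dict.modify
      have hne : ∀ d' ∈ pvTgts cond (pre ++ [(n, t, u)]), (d' == d) = false := by
        intro d' hd'
        by_contra h
        simp only [Bool.not_eq_false, beq_iff_eq] at h
        exact hm (h ▸ hd')
      have hgetD : (⟨(pvWit cond v (pre ++ [(n, t, u)])).items ++ [(d, PySem.Dict.empty)]⟩ :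
          PySem.Dict String (PySem.Dict String Int)).getD d PySem.Dict.empty = PySem.Dict.empty := by
        unfold PySem.Dict.getD PySem.Dict.get?
        rw [List.find?_append]
        have : (pvWit cond v (pre ++ [(n, t, u)])).items.find? (fun p => p.1 == d) = none := by
          rw [List.find?_eq_none]
          intro p hp
          unfold pvWit at hp
          obtain ⟨d', hd', rfl⟩ := List.mem_map.mp hp
          simp [hne d' hd']
        rw [this]
        simp
      rw [hgetD]
      simp only []
      have hie : (PySem.Dict.empty : PySem.Dict String Int).insert n (v d) = ⟨[(n, v d)]⟩ := by
        unfold PySem.Dict.insert PySem.Dict.empty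
        rw [if_neg (by simp [PySem.Dict.contains])]
        simp
      rw [hie]
      have hcont2 : (⟨(pvWit cond v (pre ++ [(n, t, u)])).items ++ [(d, PySem.Dict.empty)]⟩ :
          PySem.Dict String (PySem.Dict String Int)).contains d = true := by
        simp [PySem.Dict.contains]
      unfold PySem.Dict.insert
      rw [if_pos hcont2]
      have ht : pvTgts cond (pre ++ [(n, t, u ++ [d])]) = pvTgts cond (pre ++ [(n, t, u)]) ++ [d] := by
        rw [pvTgts_append, if_pos ⟨hc, hm⟩]
      have hpre : pvInn v pre d = [] := pvInn_nil_of_not_mem cond v pre [(n, t, u)] d hc hm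
      have hinn' : pvInn v (pre ++ [(n, t, u ++ [d])]) d = [(n, v d)] := by
        rw [pvInn_last, hpre]
        have hcd : (u ++ [d]).contains d = true := by simp
        rw [hcd]; simp
      unfold pvWit
      rw [ht, List.map_append]
      congr 1
      simp only [List.map_append, List.map_map]
      congr 1
      · apply List.map_congr_left
        intro d' hd'
        have h : d' ≠ d := fun he => hm (he ▸ hd')
        simp only [Function.comp_apply, hne d' hd', Bool.false_eq_true, if_false]
        congr 2
        rw [pvInn_last, pvInn_last, contains_last h]
      · simp [hinn']
  · rw [if_neg hc]
    unfold pvWit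
    have ht : pvTgts cond (pre ++ [(n, t, u ++ [d])]) = pvTgts cond (pre ++ [(n, t, u)]) := by
      rw [pvTgts_append, if_neg (fun h => hc h.1)]
    rw [ht]
    congr 1
    apply List.map_congr_left
    intro d' hd'
    have hcd' : cond d' = true := ((mem_pvTgts cond _ d').mp hd').1
    have hnd : d' ≠ d := fun he => hc (he ▸ hcd')
    congr 2
    rw [pvInn_last, pvInn_last, contains_last hnd]

lemma pvInner_fold (cond : String → Bool) (v : String → Int)
    (pre : List (String × String × List String)) (n t : String) (u : List String)
    (hn : n ∉ pre.map Prod.fst) :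
    u.foldl (fun c d => pvStep cond v c n d) (pvWit cond v pre)
      = pvWit cond v (pre ++ [(n, t, u)]) := by
  induction u using List.reverseRecOn with
  | nil => exact (pvWit_append_nil cond v pre n t).symm
  | append_singleton u d ih =>
    rw [List.foldl_append, ih]
    simp only [List.foldl_cons, List.foldl_nil]
    exact pvStep_wit cond v pre n t u d hn

lemma pvConj_fold (cond : String → Bool) (v : String → Int)
    (l : List (String × String × List String)) (hnd : (l.map Prod.fst).Nodup) :
    l.foldl (fun c p => p.2.2.foldl (fun c d => pvStep cond v c p.1 d) c) PySem.Dict.empty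
      = pvWit cond v l := by
  induction l using List.reverseRecOn with
  | nil => rfl
  | append_singleton l p ih =>
    rw [List.map_append] at hnd
    have h1 : (l.map Prod.fst).Nodup := (List.nodup_append.mp hnd).1
    have h2 : p.1 ∉ l.map Prod.fst := by
      have hD := (List.nodup_append.mp hnd).2.2
      intro hmem
      exact hD p.1 hmem p.1 (by simp) rfl
    rw [List.foldl_append, ih h1]
    simp only [List.foldl_cons, List.foldl_nil]
    exact pvInner_fold cond v l p.1 p.2.1 p.2.2 h2

lemma pvFF_fold (l : List (String × String × List String)) (acc : List (String × Int))
    (hdisj : ∀ p ∈ l, ∀ q ∈ acc, q.1 ≠ p.1)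
    (hnd : (l.map Prod.fst).Nodup) :
    (l.foldl (fun (d : PySem.Dict String Int) p => if p.2.1 == "%" then d.insert p.1 0 else d)
        ⟨acc⟩).items
      = acc ++ (l.filter (fun p => p.2.1 == "%")).map (fun p => (p.1, (0 : Int))) := by
  induction l generalizing acc with
  | nil => simp
  | cons p l ih =>
    simp only [List.map_cons, List.nodup_cons] at hnd
    simp only [List.foldl_cons, List.filter_cons]
    by_cases hp : p.2.1 == "%"
    · rw [if_pos hp, if_pos hp]
      have hcont : (⟨acc⟩ : PySem.Dict String Int).contains p.1 = false := by
        simp only [PySem.Dict.contains, List.any_eq_false]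
        intro q hq hbeq
        exact hdisj p (by simp) q hq (eq_of_beq hbeq)
      have hins : (⟨acc⟩ : PySem.Dict String Int).insert p.1 0 = ⟨acc ++ [(p.1, 0)]⟩ := by
        unfold PySem.Dict.insert
        rw [if_neg (by simp [hcont])]
      rw [hins, ih (acc ++ [(p.1, 0)]) ?_ hnd.2]
      · simp
      · intro r hr q hq
        rcases List.mem_append.mp hq with h | h
        · exact hdisj r (by simp [hr]) q h
        · simp only [List.mem_singleton] at h
          subst h
          intro he
          exact hnd.1 (he ▸ List.mem_map_of_mem hr)
    · rw [if_neg hp, if_neg hp]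
      exact ih acc (fun r hr q hq => hdisj r (by simp [hr]) q hq) hnd.2

theorem main_eq (modules : List (String × String × List String)) :
    sort_modules modules = sort_modules_alt modules := by
  unfold sort_modules sort_modules_alt
  dsimp only
  set m := (PySem.Dict.ofList modules).insert "rx" ("&", ([] : List String)) with hmdef
  have hnd : (m.items.map Prod.fst).Nodup := by
    have := PySem.Dict.nodup_keys_insert (PySem.Dict.ofList modules) "rx" ("&", ([] : List String))
      (PySem.Dict.nodup_keys_ofList modules)
    simpa [PySem.Dict.keys] using this
  have hsplit := PySem.List.foldl_prod_mk
    (fun (d : PySem.Dict String Int) (p : String × String × List String) =>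
      if p.2.1 == "%" then d.insert p.1 0 else d)
    (fun (c : PySem.Dict String (PySem.Dict String Int)) (p : String × String × List String) =>
      p.2.2.foldl
        (fun c oname =>
          if (m.getD oname ("", [])).1 == "&" then
            (c.setdefault oname PySem.Dict.empty).modify oname PySem.Dict.empty
              (fun inner => inner.insert p.1 (if oname == "rx" then -1 else 0))
          else c) c)
    m.items PySem.Dict.empty PySem.Dict.empty
  rw [hsplit]
  have hff := pvFF_fold m.items [] (by simp) hnd
  have hconj := pvConj_fold (fun d => (m.getD d ("", [])).1 == "&")
    (fun d => if d == "rx" then -1 else 0) m.items hnd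
  refine Prod.ext ?_ ?_
  · simpa using hff
  · show (List.foldl _ PySem.Dict.empty m.items).items.map _ = _
    rw [show (List.foldl (fun (c : PySem.Dict String (PySem.Dict String Int)) p => p.2.2.foldl
      (fun c oname =>
        if (m.getD oname ("", [])).1 == "&" then
          (c.setdefault oname PySem.Dict.empty).modify oname PySem.Dict.empty
            (fun inner => inner.insert p.1 (if oname == "rx" then -1 else 0))
        else c) c) PySem.Dict.empty m.items)
      = pvWit (fun d => (m.getD d ("", [])).1 == "&") (fun d => if d == "rx" then -1 else 0) m.items
      from hconj]
    unfold pvWit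
    simp only [List.map_map]
    rfl

-- ===== VERDICT (by name: the statement is the Claim_ definition above) =====
theorem sort_modules_spec : Claim_equal_sort_modules := by
  intro modules _ _
  unfold Spec_sort_modules
  exact main_eq modules
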